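-- pv_equiv track=rewrite | github.com/MARCIOSAGER/PAGO | skills/pago-mentoring-builder/scripts/generate_mentoring_pack.py | customize_template
-- ===== SOURCE A (Python) =====
-- def customize_template(content, title, date, location, language):
--     """Apply event-specific customizations to template content."""
--     # Add event header if title/date/location provided
--     if title or date or location:
--         header_parts = []
--         if title:
--             header_parts.append(f"**Evento:** {title}")
--         if date:
--             header_parts.append(f"**Data:** {date}")
--         if location:
--             header_parts.append(f"**Local:** {location}")
--         header = " | ".join(header_parts)
--         # Insert after the first heading
--         lines = content.split('\n')
--         for i, line in enumerate(lines):
--             if line.startswith('# ') or line.startswith('## '):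
--                 lines.insert(i + 1, f"\n{header}\n")
--                 break
--         content = '\n'.join(lines)
--     return content
-- ===== SOURCE B (Python) =====
-- import re
--
--
-- def customize_template(content, title, date, location, language):
--     """Apply event-specific customizations to template content."""
--     labels = [("**Evento:**", title), ("**Data:**", date), ("**Local:**", location)]
--     header = " | ".join("%s %s" % (lab, val) for lab, val in labels if val)
--     if not header:
--         return content
--     m = re.search(r'^#{1,2} ', content, re.MULTILINE)
--     if not m:
--         return content
--     nl = content.find('\n', m.start())
--     if nl == -1:
--         return content + "\n\n" + header + "\n"
--     return content[:nl] + "\n\n" + header + "\n\n" + content[nl + 1:]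
-- ===== Notes on version B (the rewrite author's own statement) =====
-- stated objective: alternative
-- what changed: B replaces A's split-into-lines / enumerate-scan / list.insert / '\n'.join pipeline with a direct string operation: a single re.search (MULTILINE ^#{1,2} ) for the first level-1/2 heading line, then str.find for its end and one slice-and-concatenate splice, building no line list.
import Mathlib
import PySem

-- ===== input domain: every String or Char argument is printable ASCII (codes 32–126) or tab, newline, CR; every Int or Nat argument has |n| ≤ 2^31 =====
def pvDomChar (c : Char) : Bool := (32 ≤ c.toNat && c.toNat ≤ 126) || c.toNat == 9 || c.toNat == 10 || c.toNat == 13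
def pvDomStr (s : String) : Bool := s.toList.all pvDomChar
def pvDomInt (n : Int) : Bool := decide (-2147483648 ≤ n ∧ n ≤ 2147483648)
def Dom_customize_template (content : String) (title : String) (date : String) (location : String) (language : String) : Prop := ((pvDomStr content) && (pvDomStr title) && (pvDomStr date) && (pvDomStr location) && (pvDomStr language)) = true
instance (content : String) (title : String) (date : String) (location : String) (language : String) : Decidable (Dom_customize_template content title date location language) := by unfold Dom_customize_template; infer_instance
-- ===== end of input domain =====

-- B replaces A's split-into-lines / enumerate-scan / list.insert / join pipeline by a direct
-- string operation: scan once for the first line starting '# ' or '## ' and splice the header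
-- in by slicing (objective: alternative; same asymptotic cost, no line list is built).


-- ===== PORT A =====
-- line.startswith('# ') or line.startswith('## ')
def ct_isHeading (line : List Char) : Bool :=
  PySem.Chars.startswith line "# ".toList || PySem.Chars.startswith line "## ".toList

-- the 'for i, line in enumerate(lines): if …: …; break' scan — index of the first heading line
def ct_findA : List (List Char) → Nat → Option Nat
  | [], _ => none
  | line :: rest, i => if ct_isHeading line then some i else ct_findA rest (i + 1)

-- header_parts built by the three 'if …: header_parts.append(…)' statements
def ct_headerParts (title date location : String) : List (List Char) :=
  let ps : List (List Char) := []
  let ps := if !title.toList.isEmpty then ps ++ ["**Evento:** ".toList ++ title.toList] else ps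
  let ps := if !date.toList.isEmpty then ps ++ ["**Data:** ".toList ++ date.toList] else ps
  let ps := if !location.toList.isEmpty then ps ++ ["**Local:** ".toList ++ location.toList] else ps
  ps

-- split / find-and-insert / join body of A (inside the 'if title or date or location')
def ct_apply (header : List Char) (cs : List Char) : List Char :=
  let lines := PySem.Chars.splitOn cs ['\n']
  let lines :=
    match ct_findA lines 0 with
    | some i => PySem.List.insert lines ((i : Int) + 1) ('\n' :: header ++ ['\n'])
    | none => lines
  PySem.Chars.join ['\n'] lines

def customize_template (content : String) (title : String) (date : String) (location : String) (language : String) : String :=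
  if !title.toList.isEmpty || !date.toList.isEmpty || !location.toList.isEmpty then
    String.ofList (ct_apply (PySem.Chars.join " | ".toList (ct_headerParts title date location)) content.toList)
  else content

-- ===== PORT B =====
-- " | ".join(f"{lab} {val}" for lab, val in labels if val)
def ctB_header (title date location : String) : List Char :=
  PySem.Chars.join " | ".toList
    ((([("**Evento:**".toList, title), ("**Data:**".toList, date), ("**Local:**".toList, location)].filter
        (fun p => !p.2.toList.isEmpty)).map (fun p => p.1 ++ ' ' :: p.2.toList)))

-- the regex alternation '#{1,2} ' tested at one position
def ctB_isHead (cs : List Char) : Bool :=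
  PySem.Chars.startswith cs "# ".toList || PySem.Chars.startswith cs "## ".toList

-- hand port of re.search(r'^#{1,2} ', content, re.MULTILINE): exact because MULTILINE '^'
-- matches exactly at index 0 and right after each '\n'; returns m.start() of the first match
def ctB_search : List Char → Nat → Bool → Option Nat
  | [], _, _ => none
  | c :: rest, k, atStart =>
    if atStart && ctB_isHead (c :: rest) then some k
    else ctB_search rest (k + 1) (c == '\n')

-- search / find('\n', m) / slice-and-splice body of B
def ctB_apply (header : List Char) (cs : List Char) : List Char :=
  match ctB_search cs 0 true with
  | none => cs
  | some m =>
    let nl := PySem.Chars.findFrom cs ['\n'] (m : Int)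
    if nl = -1 then cs ++ '\n' :: '\n' :: header ++ ['\n']
    else cs.take nl.toNat ++ '\n' :: '\n' :: header ++ '\n' :: '\n' :: cs.drop (nl.toNat + 1)

def customize_template_alt (content : String) (title : String) (date : String) (location : String) (language : String) : String :=
  let header := ctB_header title date location
  if header.isEmpty then content
  else String.ofList (ctB_apply header content.toList)

-- ===== PRECONDITION & SPEC =====
def Spec_customize_template (content : String) (title : String) (date : String) (location : String) (language : String) (out : String) : Prop := out = customize_template_alt content title date location language
instance (content : String) (title : String) (date : String) (location : String) (language : String) (out : String) : Decidable (Spec_customize_template content title date location language out) := by unfold Spec_customize_template; infer_instance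

-- ===== CLAIM (what is proved, stated in full; the proofs are below) =====
def Claim_equal_customize_template : Prop := ∀ (content : String) (title : String) (date : String) (location : String) (language : String), Dom_customize_template content title date location language → Spec_customize_template content title date location language (customize_template content title date location language)

-- ===== LEMMAS AND PROOFS =====

lemma ct_go_spec (c : Char) : ∀ (fuel : Nat) (l cur : List Char) (acc : List (List Char)),
    l.length ≤ fuel →
    PySem.Chars.splitOn.go [c] fuel l cur acc
      = acc.reverse ++ (List.splitOn c l).modifyHead (cur.reverse ++ ·) := by
  intro fuel
  induction fuel with
  | zero =>
    intro l cur acc h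
    have : l = [] := by cases l <;> simp_all
    subst this
    simp [PySem.Chars.splitOn.go, List.splitOn, List.splitOnP_nil]
  | succ fuel ih =>
    intro l cur acc h
    cases l with
    | nil => simp [PySem.Chars.splitOn.go, List.splitOn, List.splitOnP_nil]
    | cons x rest =>
      simp only [PySem.Chars.splitOn.go]
      by_cases hx : x = c
      · subst hx
        have hpre : List.isPrefixOf [x] (x :: rest) = true := by simp [List.isPrefixOf]
        rw [if_pos hpre]
        rw [ih _ _ _ (by simpa using Nat.le_of_succ_le_succ h)]
        simp only [List.splitOn, List.splitOnP_cons]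
        simp only [beq_self_eq_true, if_true, List.reverse_nil, List.nil_append]
        have : (fun (t : List Char) => t) = id := rfl
        rw [this, List.modifyHead_id]
        simp
      · have hpre : List.isPrefixOf [c] (x :: rest) = false := by
          simp [List.isPrefixOf]; exact fun hc => absurd hc.symm hx
        rw [if_neg (by simp [hpre])]
        rw [ih _ _ _ (by simpa using Nat.le_of_succ_le_succ h)]
        simp only [List.splitOn, List.splitOnP_cons]
        rw [if_neg (by simp [hx])]
        rw [List.modifyHead_modifyHead]
        have : ((fun t => (x :: cur).reverse ++ t) : List Char → List Char)
            = ((fun t => cur.reverse ++ t) ∘ List.cons x) := by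
          funext t; simp
        rw [this]
lemma ct_splitOn_eq (c : Char) (cs : List Char) :
    PySem.Chars.splitOn cs [c] = List.splitOn c cs := by
  unfold PySem.Chars.splitOn
  rw [ct_go_spec c _ _ _ _ (by omega)]
  have h := List.splitOnP_ne_nil (fun x => x == c) cs
  cases hs : List.splitOn c cs with
  | nil => exact absurd hs h
  | cons a t => simp






lemma ct_splitOn_ne_nil (c : Char) (cs : List Char) : List.splitOn c cs ≠ [] :=
  List.splitOnP_ne_nil _ cs

lemma ct_splitOn_no_sep (cs : List Char) (h : '\n' ∉ cs) : List.splitOn '\n' cs = [cs] := by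
  induction cs with
  | nil => simp [List.splitOn, List.splitOnP_nil]
  | cons x rest ih =>
    have hx : x ≠ '\n' := fun hc => h (by simp [hc])
    have hr : '\n' ∉ rest := fun hc => h (by simp [hc])
    simp only [List.splitOn, List.splitOnP_cons] at *
    rw [if_neg (by simp [hx]), ih hr]
    simp

lemma ct_splitOn_append (l1 rest : List Char) (h : '\n' ∉ l1) :
    List.splitOn '\n' (l1 ++ '\n' :: rest) = l1 :: List.splitOn '\n' rest := by
  induction l1 with
  | nil => simp [List.splitOn, List.splitOnP_cons]
  | cons x t ih =>
    have hx : x ≠ '\n' := fun hc => h (by simp [hc])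
    have ht : '\n' ∉ t := fun hc => h (by simp [hc])
    simp only [List.cons_append, List.splitOn, List.splitOnP_cons] at *
    rw [if_neg (by simp [hx]), ih ht]
    simp

lemma ct_join_cons (sep p : List Char) (X : List (List Char)) (h : X ≠ []) :
    PySem.Chars.join sep (p :: X) = p ++ sep ++ PySem.Chars.join sep X := by
  cases X with
  | nil => exact absurd rfl h
  | cons q t => exact PySem.Chars.join_cons_cons sep p q t

lemma ct_join_splitOn (cs : List Char) :
    PySem.Chars.join ['\n'] (List.splitOn '\n' cs) = cs := by
  have := List.intercalate_splitOn cs '\n'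
  simpa [PySem.Chars.join] using this

lemma ct_findA_offset (ls : List (List Char)) : ∀ (i : Nat),
    ct_findA ls i = (ct_findA ls 0).map (· + i) := by
  induction ls with
  | nil => intro i; simp [ct_findA]
  | cons l t ih =>
    intro i
    by_cases hl : ct_isHeading l
    · simp [ct_findA, hl]
    · simp only [ct_findA, hl, if_false, Bool.false_eq_true]
      rw [ih (i + 1), ih 1]
      cases ct_findA t 0 <;> simp <;> omega

lemma ct_findA_bound (ls : List (List Char)) : ∀ (m : Nat), ct_findA ls 0 = some m →
    m < ls.length := by
  induction ls with
  | nil => intro m h; simp [ct_findA] at h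
  | cons l t ih =>
    intro m h
    by_cases hl : ct_isHeading l
    · simp [ct_findA, hl] at h; simp only [List.length_cons]; omega
    · simp only [ct_findA, hl, if_false, Bool.false_eq_true] at h
      rw [ct_findA_offset] at h
      cases ht : ct_findA t 0 with
      | none => rw [ht] at h; simp at h
      | some m' =>
        rw [ht] at h; simp at h
        have := ih m' ht
        simp [← h]; omega

lemma ctB_search_offset (cs : List Char) : ∀ (k : Nat) (b : Bool),
    ctB_search cs k b = (ctB_search cs 0 b).map (· + k) := by
  induction cs with
  | nil => intro k b; simp [ctB_search]
  | cons c rest ih =>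
    intro k b
    by_cases hm : (b && ctB_isHead (c :: rest)) = true
    · simp [ctB_search, hm]
    · simp only [ctB_search, hm, if_false, Bool.false_eq_true]
      rw [ih (k + 1), ih 1]
      cases ctB_search rest 0 (c == '\n') <;> simp <;> omega

lemma ctB_search_false_none (cs : List Char) : ∀ (k : Nat), '\n' ∉ cs →
    ctB_search cs k false = none := by
  induction cs with
  | nil => intro k _; simp [ctB_search]
  | cons c rest ih =>
    intro k h
    have hc : c ≠ '\n' := fun hc => h (by simp [hc])
    simp only [ctB_search, Bool.false_and, if_false, Bool.false_eq_true]
    rw [show (c == '\n') = false by simp [hc]]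
    exact ih (k + 1) (fun hm => h (by simp [hm]))

lemma ctB_search_skip_line (l1 : List Char) : ∀ (rest : List Char), '\n' ∉ l1 →
    ctB_search (l1 ++ '\n' :: rest) 0 false
      = (ctB_search rest 0 true).map (· + (l1.length + 1)) := by
  induction l1 with
  | nil =>
    intro rest _
    simp only [List.nil_append, ctB_search, Bool.false_and, if_false, Bool.false_eq_true]
    rw [show ('\n' == '\n') = true by simp]
    rw [ctB_search_offset]
    simp
  | cons a t ih =>
    intro rest h
    have ha : a ≠ '\n' := fun hc => h (by simp [hc])
    simp only [List.cons_append, ctB_search, Bool.false_and, if_false, Bool.false_eq_true]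
    rw [show (a == '\n') = false by simp [ha]]
    rw [ctB_search_offset, ih rest (fun hm => h (by simp [hm]))]
    cases ctB_search rest 0 true <;> simp <;> omega

lemma ctB_isHead_line (l1 rest : List Char) :
    ctB_isHead (l1 ++ '\n' :: rest) = ct_isHeading l1 := by
  unfold ctB_isHead ct_isHeading
  match l1 with
  | [] => simp [PySem.Chars.startswith, List.isPrefixOf]
  | [a] => simp [PySem.Chars.startswith, List.isPrefixOf]
  | [a, b] => simp [PySem.Chars.startswith, List.isPrefixOf]
  | a :: b :: c :: t => simp [PySem.Chars.startswith, List.isPrefixOf]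

lemma ctB_search_line (l1 rest : List Char) (h : '\n' ∉ l1) (hh : ct_isHeading l1 = false) :
    ctB_search (l1 ++ '\n' :: rest) 0 true
      = (ctB_search rest 0 true).map (· + (l1.length + 1)) := by
  have hhd : ctB_isHead (l1 ++ '\n' :: rest) = false := by rw [ctB_isHead_line]; exact hh
  cases l1 with
  | nil =>
    simp only [List.nil_append] at *
    simp only [ctB_search, hhd, Bool.and_false, if_false, Bool.false_eq_true]
    rw [show ('\n' == '\n') = true by simp, ctB_search_offset]
    simp
  | cons a t =>
    have ha : a ≠ '\n' := fun hc => h (by simp [hc])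
    simp only [List.cons_append] at hhd ⊢
    simp only [ctB_search, hhd, Bool.and_false, if_false, Bool.false_eq_true]
    rw [show (a == '\n') = false by simp [ha], ctB_search_offset,
      ctB_search_skip_line t rest (fun hm => h (by simp [hm]))]
    cases ctB_search rest 0 true <;> simp <;> omega

lemma ctB_search_no_sep_none (cs : List Char) (h : '\n' ∉ cs) (hh : ctB_isHead cs = false) :
    ctB_search cs 0 true = none := by
  cases cs with
  | nil => simp [ctB_search]
  | cons c rest =>
    have hc : c ≠ '\n' := fun hc => h (by simp [hc])
    simp only [ctB_search, hh, Bool.and_false, if_false, Bool.false_eq_true]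
    rw [show (c == '\n') = false by simp [hc]]
    exact ctB_search_false_none rest 1 (fun hm => h (by simp [hm]))

lemma ctB_search_head (cs : List Char) (hh : ctB_isHead cs = true) :
    ctB_search cs 0 true = some 0 := by
  cases cs with
  | nil =>
    exfalso
    simp [ctB_isHead, PySem.Chars.startswith] at hh
  | cons c rest => simp [ctB_search, hh]

lemma ctB_search_bound (cs : List Char) : ∀ (b : Bool) (m : Nat), ctB_search cs 0 b = some m →
    m < cs.length := by
  induction cs with
  | nil => intro b m h; simp [ctB_search] at h
  | cons c rest ih =>
    intro b m h
    by_cases hm : (b && ctB_isHead (c :: rest)) = true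
    · simp [ctB_search, hm] at h
      simp only [List.length_cons]; omega
    · simp only [ctB_search, hm, if_false, Bool.false_eq_true] at h
      rw [ctB_search_offset] at h
      cases ht : ctB_search rest 0 (c == '\n') with
      | none => rw [ht] at h; simp at h
      | some m' =>
        rw [ht] at h; simp at h
        have := ih _ m' ht
        simp only [List.length_cons]; omega

lemma ct_find_no_newline (cs : List Char) (h : '\n' ∉ cs) :
    PySem.Chars.find cs ['\n'] = -1 := by
  rw [PySem.Chars.find_eq_neg_one_iff]
  rw [List.singleton_infix_iff]
  exact h

lemma ct_prefix_drop_iff (cs : List Char) (j : Nat) :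
    ['\n'] <+: cs.drop j ↔ cs[j]? = some '\n' := by
  rw [← List.head?_drop]
  constructor
  · rintro ⟨t, ht⟩
    rw [← ht]; rfl
  · intro hh
    cases hd : cs.drop j with
    | nil => rw [hd] at hh; simp at hh
    | cons a t =>
      rw [hd] at hh; simp at hh
      exact ⟨t, by simp [hh]⟩

lemma ct_find_first_newline (l1 rest : List Char) (h : '\n' ∉ l1) :
    PySem.Chars.find (l1 ++ '\n' :: rest) ['\n'] = (l1.length : Int) := by
  have hinf : ['\n'] <:+: (l1 ++ '\n' :: rest) := by
    rw [List.singleton_infix_iff]; simp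
  have hnn : 0 ≤ PySem.Chars.find (l1 ++ '\n' :: rest) ['\n'] := by
    rw [PySem.Chars.find_nonneg_iff]; exact hinf
  obtain ⟨hpre, hmin⟩ := PySem.Chars.find_spec hnn
  have hget : (l1 ++ '\n' :: rest)[l1.length]? = some '\n' := by
    rw [List.getElem?_append_right (le_refl _)]
    simp
  have hle : (PySem.Chars.find (l1 ++ '\n' :: rest) ['\n']).toNat ≤ l1.length := by
    by_contra hlt
    exact hmin l1.length (by omega) ((ct_prefix_drop_iff _ l1.length).mpr hget)
  have hge : l1.length ≤ (PySem.Chars.find (l1 ++ '\n' :: rest) ['\n']).toNat := by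
    by_contra hlt
    have hj := (ct_prefix_drop_iff (l1 ++ '\n' :: rest) _).mp hpre
    rw [List.getElem?_append_left (by omega)] at hj
    exact h (List.mem_of_getElem? hj)
  have ht := Int.toNat_of_nonneg hnn
  omega

lemma ct_exists_split (cs : List Char) (h : '\n' ∈ cs) :
    ∃ l1 rest, cs = l1 ++ '\n' :: rest ∧ '\n' ∉ l1 := by
  induction cs with
  | nil => simp at h
  | cons c rest ih =>
    by_cases hc : c = '\n'
    · exact ⟨[], rest, by simp [hc], by simp⟩
    · have : '\n' ∈ rest := by
        rcases List.mem_cons.mp h with h1 | h1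
        · exact absurd h1.symm hc
        · exact h1
      obtain ⟨l1, r, hr, hn⟩ := ih this
      exact ⟨c :: l1, r, by simp [hr], by simp [hn]; exact fun hh => hc hh.symm⟩



lemma ctB_isHead_eq : ctB_isHead = ct_isHeading := rfl

lemma ct_apply_cons_line (header l1 rest : List Char) (hnl : '\n' ∉ l1)
    (hh : ct_isHeading l1 = false) :
    ct_apply header (l1 ++ '\n' :: rest) = l1 ++ '\n' :: ct_apply header rest := by
  unfold ct_apply
  rw [ct_splitOn_eq, ct_splitOn_eq, ct_splitOn_append _ _ hnl]
  have hne := ct_splitOn_ne_nil '\n' rest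
  simp only [ct_findA, hh, if_false, Bool.false_eq_true]
  rw [ct_findA_offset]
  cases hfa : ct_findA (List.splitOn '\n' rest) 0 with
  | none =>
    simp only [Option.map_none]
    rw [ct_join_cons _ _ _ hne]
    simp
  | some i =>
    have hib := ct_findA_bound _ _ hfa
    simp only [Option.map_some]
    rw [show ((((i + 1 : Nat)) : Int) + 1) = (((i + 2 : Nat)) : Int) by push_cast; ring]
    rw [show ((i : Int) + 1) = (((i + 1 : Nat)) : Int) by push_cast; ring]
    rw [PySem.List.insert_natCast _ _ _ (by simp only [List.length_cons]; omega)]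
    rw [PySem.List.insert_natCast _ _ _ (by omega)]
    rw [show i + 2 = (i + 1) + 1 by ring]
    simp only [List.take_succ_cons, List.drop_succ_cons, List.cons_append]
    rw [ct_join_cons _ _ _ (by simp)]
    simp

lemma ctB_apply_cons_line (header l1 rest : List Char) (hnl : '\n' ∉ l1)
    (hh : ct_isHeading l1 = false) :
    ctB_apply header (l1 ++ '\n' :: rest) = l1 ++ '\n' :: ctB_apply header rest := by
  unfold ctB_apply
  rw [ctB_search_line l1 rest hnl hh]
  cases hs : ctB_search rest 0 true with
  | none => simp
  | some m =>
    have hmb := ctB_search_bound rest true m hs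
    simp only [Option.map_some]
    have hlen : (l1 ++ '\n' :: rest).length = l1.length + 1 + rest.length := by
      simp; omega
    rw [PySem.Chars.findFrom_natCast _ _ _ (by omega)]
    rw [PySem.Chars.findFrom_natCast _ _ _ (by omega)]
    have hdrop : (l1 ++ '\n' :: rest).drop (m + (l1.length + 1)) = rest.drop m := by
      rw [show m + (l1.length + 1) = l1.length + (1 + m) by omega]
      rw [List.drop_length_add_append]
      rw [show 1 + m = m + 1 by omega, List.drop_succ_cons]
    rw [hdrop]
    by_cases hf : PySem.Chars.find (rest.drop m) ['\n'] = -1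
    · simp [hf]
    · simp only [if_neg hf]
      have hf0 : 0 ≤ PySem.Chars.find (rest.drop m) ['\n'] := by
        have := PySem.Chars.neg_one_le_find (rest.drop m) ['\n']
        omega
      have hnl1 : ¬ ((((m + (l1.length + 1) : Nat)) : Int) + PySem.Chars.find (rest.drop m) ['\n'] = -1) := by
        omega
      have hnl2 : ¬ (((m : Nat) : Int) + PySem.Chars.find (rest.drop m) ['\n'] = -1) := by
        omega
      simp only [if_neg hnl1, if_neg hnl2]
      have htn := Int.toNat_of_nonneg hf0
      have ht1 : ((((m + (l1.length + 1) : Nat)) : Int) + PySem.Chars.find (rest.drop m) ['\n']).toNat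
          = l1.length + (1 + (((m : Nat) : Int) + PySem.Chars.find (rest.drop m) ['\n']).toNat) := by
        omega
      rw [ht1]
      generalize (((m : Nat) : Int) + PySem.Chars.find (List.drop m rest) ['\n']).toNat = K
      rw [List.take_length_add_append]
      rw [show l1.length + (1 + K) + 1 = l1.length + (1 + K + 1) by omega]
      rw [List.drop_length_add_append]
      rw [show 1 + K = K + 1 by omega]
      simp only [List.take_succ_cons, List.drop_succ_cons]
      simp

lemma ct_apply_head_line (header l1 rest : List Char) (hnl : '\n' ∉ l1)
    (hh : ct_isHeading l1 = true) :
    ct_apply header (l1 ++ '\n' :: rest) = ctB_apply header (l1 ++ '\n' :: rest) := by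
  have hne := ct_splitOn_ne_nil '\n' rest
  unfold ct_apply ctB_apply
  rw [ct_splitOn_eq, ct_splitOn_append _ _ hnl]
  simp only [ct_findA, hh, if_true]
  rw [show ((0 : Nat) : Int) + 1 = (((1 : Nat)) : Int) by norm_num]
  rw [PySem.List.insert_natCast _ _ _ (by simp only [List.length_cons]; omega)]
  simp only [List.take_succ_cons, List.take_zero, List.drop_succ_cons, List.drop_zero,
    List.cons_append, List.nil_append]
  rw [ct_join_cons _ _ _ (by simp), ct_join_cons _ _ _ hne, ct_join_splitOn]
  -- B side
  rw [ctB_search_head _ (by rw [ctB_isHead_line]; exact hh)]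
  simp only []
  rw [PySem.Chars.findFrom_natCast _ _ 0 (by omega)]
  simp only [List.drop_zero]
  rw [ct_find_first_newline _ _ hnl]
  rw [if_neg (by omega : ¬ ((l1.length : Int) = -1))]
  rw [show (((0 : Nat) : Int) + (l1.length : Int)) = (l1.length : Int) by omega]
  rw [if_neg (by omega : ¬ ((l1.length : Int) = -1))]
  rw [Int.toNat_natCast]
  rw [List.take_left]
  have hdrop : List.drop (l1.length + 1) (l1 ++ '\n' :: rest) = rest := by
    rw [List.drop_length_add_append]
    simp
  rw [hdrop]
  simp

lemma ct_apply_no_newline (header cs : List Char) (hmem : '\n' ∉ cs) :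
    ct_apply header cs = ctB_apply header cs := by
  unfold ct_apply ctB_apply
  rw [ct_splitOn_eq, ct_splitOn_no_sep _ hmem]
  by_cases hh : ct_isHeading cs = true
  · simp only [ct_findA, hh, if_true]
    rw [show ((0 : Nat) : Int) + 1 = (((1 : Nat)) : Int) by norm_num]
    rw [PySem.List.insert_natCast _ _ _ (by simp)]
    simp only [List.take_succ_cons, List.take_zero, List.drop_succ_cons, List.drop_zero,
      List.cons_append, List.nil_append]
    rw [ct_join_cons _ _ _ (by simp), PySem.Chars.join_singleton]
    rw [ctB_search_head _ (by rw [ctB_isHead_eq]; exact hh)]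
    simp only []
    rw [PySem.Chars.findFrom_natCast _ _ 0 (by omega)]
    simp only [List.drop_zero]
    rw [ct_find_no_newline _ hmem]
    simp
  · have hh' : ct_isHeading cs = false := by revert hh; cases ct_isHeading cs <;> simp
    simp only [ct_findA, hh', if_false, Bool.false_eq_true]
    rw [PySem.Chars.join_singleton]
    rw [ctB_search_no_sep_none _ hmem (by rw [ctB_isHead_eq]; exact hh')]

lemma ct_apply_eq' (header : List Char) : ∀ (n : Nat) (cs : List Char), cs.length ≤ n →
    ct_apply header cs = ctB_apply header cs := by
  intro n
  induction n with
  | zero =>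
    intro cs h
    have : cs = [] := by cases cs <;> simp_all
    subst this
    exact ct_apply_no_newline header [] (by simp)
  | succ n ih =>
    intro cs h
    by_cases hmem : '\n' ∈ cs
    · obtain ⟨l1, rest, hcs, hnl⟩ := ct_exists_split cs hmem
      subst hcs
      by_cases hh : ct_isHeading l1 = true
      · exact ct_apply_head_line header l1 rest hnl hh
      · have hh' : ct_isHeading l1 = false := by revert hh; cases ct_isHeading l1 <;> simp
        rw [ct_apply_cons_line header l1 rest hnl hh', ctB_apply_cons_line header l1 rest hnl hh']
        rw [ih rest (by simp at h; omega)]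
    · exact ct_apply_no_newline header cs hmem

lemma ct_apply_eq (header cs : List Char) : ct_apply header cs = ctB_apply header cs :=
  ct_apply_eq' header cs.length cs (le_refl _)



lemma ct_header_eq (title date location : String) :
    PySem.Chars.join " | ".toList (ct_headerParts title date location)
      = ctB_header title date location := by
  unfold ct_headerParts ctB_header
  cases ht : title.toList.isEmpty <;> cases hd : date.toList.isEmpty <;>
    cases hl : location.toList.isEmpty <;>
    simp [List.filter, ht, hd, hl]

lemma ct_guard_eq (title date location : String) :
    (ctB_header title date location).isEmpty
      = !(!title.toList.isEmpty || !date.toList.isEmpty || !location.toList.isEmpty) := by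
  unfold ctB_header
  cases ht : title.toList.isEmpty <;> cases hd : date.toList.isEmpty <;>
    cases hl : location.toList.isEmpty <;>
    simp [List.filter, ht, hd, hl, PySem.Chars.join_singleton] <;>
    rw [ct_join_cons _ _ _ (by simp)] <;> simp

-- ===== VERDICT (by name: the statement is the Claim_ definition above) =====
theorem customize_template_spec : Claim_equal_customize_template := by
  intro content title date location language _
  unfold Spec_customize_template customize_template customize_template_alt
  rw [ct_header_eq]
  have hg := ct_guard_eq title date location
  by_cases h : (!title.toList.isEmpty || !date.toList.isEmpty || !location.toList.isEmpty) = true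
  · rw [if_pos h, ct_apply_eq]
    rw [h] at hg
    simp only [Bool.not_true] at hg
    rw [if_neg (by simp [hg])]
  · rw [if_neg h]
    have h' : (!title.toList.isEmpty || !date.toList.isEmpty || !location.toList.isEmpty) = false := by
      revert h; cases (!title.toList.isEmpty || !date.toList.isEmpty || !location.toList.isEmpty) <;> simp
    rw [h'] at hg
    simp only [Bool.not_false] at hg
    rw [if_pos hg]
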